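-- pv_equiv track=rewrite | github.com/xode114kr1/algorithm-study | 프로그래머스/2/154540. 무인도 여행/무인도 여행.py | solution
-- ===== SOURCE A (Python) =====
-- def solution(maps):
--     def dfs(x, y):
--         total = int(maps[x][y])
--         for dx, dy in direction:
--             nx, ny = x + dx, y + dy
--             if nx < 0 or ny < 0 or nx >= n or ny >= m:
--                 continue
--             if not isVisited[nx][ny] and maps[nx][ny] != "X":
--                 isVisited[nx][ny] = True
--                 total += dfs(nx, ny)
--         return total
--     n, m = len(maps), len(maps[0])
--     isVisited = [[False] * m for _ in range(n)]
--     direction = [(0, 1), (0, -1), (1, 0), (-1, 0)]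
--     ans = []
--     for i in range(n):
--         for j in range(m):
--             if not isVisited[i][j] and maps[i][j] != "X":
--                 isVisited[i][j] = True
--                 ans.append(dfs(i, j))
--
--     return [-1] if len(ans) == 0 else sorted(ans)
-- ===== SOURCE B (Python) =====
-- def solution(maps):
--     n, m = len(maps), len(maps[0])
--     land = [(i, j) for i in range(n) for j in range(m) if maps[i][j] != "X"]
--     seen = set()
--     sums = []
--     for cell in land:
--         if cell in seen:
--             continue
--         comp = {cell}
--         frontier = {cell}
--         while frontier:
--             nxt = set()
--             for x, y in frontier:
--                 for dx, dy in ((0, 1), (0, -1), (1, 0), (-1, 0)):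
--                     p = (x + dx, y + dy)
--                     if 0 <= p[0] < n and 0 <= p[1] < m and maps[p[0]][p[1]] != "X" \
--                             and p not in comp and p not in seen:
--                         nxt.add(p)
--             comp |= nxt
--             frontier = nxt
--         seen |= comp
--         sums.append(sum(int(maps[x][y]) for x, y in comp))
--     return sorted(sums) if sums else [-1]
-- ===== Notes on version B (the rewrite author's own statement) =====
-- stated objective: alternative
-- what changed: Instead of a nested row/column scan with a recursive dfs mutating a visited matrix, B first builds a flat list of land cells by comprehension, then for each unseen land cell runs a frontier-set BFS (repeatedly expanding a whole generation of neighbours into a component set until the frontier is empty), sums the component at the end, and tracks visited cells in a single set.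
import Mathlib
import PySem

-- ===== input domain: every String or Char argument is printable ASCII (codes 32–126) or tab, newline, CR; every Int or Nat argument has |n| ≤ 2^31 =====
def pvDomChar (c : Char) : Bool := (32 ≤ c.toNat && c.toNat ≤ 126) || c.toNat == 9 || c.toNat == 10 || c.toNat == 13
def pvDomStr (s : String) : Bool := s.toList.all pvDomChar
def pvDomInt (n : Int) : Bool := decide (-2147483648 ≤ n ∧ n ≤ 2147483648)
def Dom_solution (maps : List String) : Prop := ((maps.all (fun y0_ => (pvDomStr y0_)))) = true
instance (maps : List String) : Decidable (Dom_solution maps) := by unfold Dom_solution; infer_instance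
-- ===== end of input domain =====

-- B replaces the row/column scan + recursive dfs by a flat land-cell list and a
-- frontier-set BFS run to a fixpoint; same return value, alternative structure.

-- ===== PORT A =====
-- shared primitives: maps[x][y] and int(maps[x][y]) (the .getD defaults are never
-- reached under Pre_solution, which guarantees every access is in range)
def pvRowChars (maps : List String) (x : Int) : List Char :=
  ((PySem.List.pyGet? maps x).getD "").toList

def pvCharAt (maps : List String) (x y : Int) : Char :=
  (PySem.List.pyGet? (pvRowChars maps x) y).getD 'X'

def pvValAt (maps : List String) (x y : Int) : Int :=
  (PySem.Int.ofStr? (String.ofList [pvCharAt maps x y])).getD 0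

def pvDirs : List (Int × Int) := [(0, 1), (0, -1), (1, 0), (-1, 0)]

-- the recursive dfs of A; the isVisited boolean matrix is ported as the set of
-- visited coordinates; fuel bounds the recursion depth (n*m+1 always suffices)
def pvDfsA (maps : List String) (n m : Int) (fuel : Nat) (x y : Int)
    (vis : Finset (Int × Int)) : Int × Finset (Int × Int) :=
  match fuel with
  | 0 => (0, vis)
  | f + 1 =>
    pvDirs.foldl (fun st d =>
      let nx := x + d.1
      let ny := y + d.2
      if nx < 0 ∨ ny < 0 ∨ n ≤ nx ∨ m ≤ ny then st
      else if (nx, ny) ∉ st.2 ∧ pvCharAt maps nx ny ≠ 'X' then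
        let r := pvDfsA maps n m f nx ny (insert (nx, ny) st.2)
        (st.1 + r.1, r.2)
      else st) (pvValAt maps x y, vis)

def solution (maps : List String) : List Int :=
  let n : Int := (maps.length : Int)
  let m : Int := ((maps.headD "").toList.length : Int)
  let fuel : Nat := maps.length * (maps.headD "").toList.length + 1
  let res := (PySem.List.pyRange 0 n 1).foldl (fun st i =>
    (PySem.List.pyRange 0 m 1).foldl (fun (st : Finset (Int × Int) × List Int) j =>
      if (i, j) ∈ st.1 ∨ pvCharAt maps i j = 'X' then st
      else
        let r := pvDfsA maps n m fuel i j (insert (i, j) st.1)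
        (r.2, st.2 ++ [r.1])) st) (∅, ([] : List Int))
  if res.2.length = 0 then [-1] else PySem.List.sorted res.2 (fun x => x) false

-- ===== PORT B =====
-- the land-cell comprehension of B, row-major
def pvLandCells (maps : List String) (n m : Int) : List (Int × Int) :=
  (PySem.List.pyRange 0 n 1).flatMap (fun i =>
    ((PySem.List.pyRange 0 m 1).filter (fun j => decide (pvCharAt maps i j ≠ 'X'))).map
      (fun j => (i, j)))

-- one BFS generation: the set nxt of fresh in-bounds land neighbours of the frontier
def pvNxt (maps : List String) (n m : Int) (seen comp frontier : Finset (Int × Int)) :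
    Finset (Int × Int) :=
  (frontier.biUnion (fun p => (pvDirs.map (fun d => (p.1 + d.1, p.2 + d.2))).toFinset)).filter
    (fun q => 0 ≤ q.1 ∧ q.1 < n ∧ 0 ≤ q.2 ∧ q.2 < m ∧ pvCharAt maps q.1 q.2 ≠ 'X' ∧
      q ∉ comp ∧ q ∉ seen)

-- the while-loop of B: grow comp one generation at a time until the frontier dies out
def pvBfs (maps : List String) (n m : Int) (seen : Finset (Int × Int)) :
    Nat → Finset (Int × Int) → Finset (Int × Int) → Finset (Int × Int)
  | 0, comp, _ => comp
  | f + 1, comp, frontier =>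
    if frontier = ∅ then comp
    else
      let nxt := pvNxt maps n m seen comp frontier
      pvBfs maps n m seen f (comp ∪ nxt) nxt

def solution_alt (maps : List String) : List Int :=
  let n : Int := (maps.length : Int)
  let m : Int := ((maps.headD "").toList.length : Int)
  let fuel : Nat := maps.length * (maps.headD "").toList.length + 1
  let res := (pvLandCells maps n m).foldl
    (fun (st : Finset (Int × Int) × List Int) cell =>
      if cell ∈ st.1 then st
      else
        let comp := pvBfs maps n m st.1 fuel {cell} {cell}
        (st.1 ∪ comp, st.2 ++ [∑ q ∈ comp, pvValAt maps q.1 q.2]))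
    (∅, ([] : List Int))
  if res.2.isEmpty then [-1] else PySem.List.sorted res.2 (fun x => x) false

-- ===== PRECONDITION & SPEC =====
-- Pre_ is exactly the no-exception domain of A: maps must be nonempty (len(maps[0])),
-- every row at least as long as the first (every cell of the n×m scan is read), and
-- every scanned cell a decimal digit or 'X' (every non-'X' scanned cell reaches int()).
def Pre_solution (maps : List String) : Prop :=
  maps ≠ [] ∧ (maps.all (fun st =>
    decide ((maps.headD "").toList.length ≤ st.toList.length) &&
    (st.toList.take (maps.headD "").toList.length).all
      (fun c => c.isDigit || c == 'X'))) = true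
instance (maps : List String) : Decidable (Pre_solution maps) := by
  unfold Pre_solution; infer_instance

def pvWitness_solution : List String := ["12X", "X3X"]

def Spec_solution (maps : List String) (out : List Int) : Prop := out = solution_alt maps
instance (maps : List String) (out : List Int) : Decidable (Spec_solution maps out) := by
  unfold Spec_solution; infer_instance

-- ===== CLAIM (what is proved, stated in full; the proofs are below) =====
def Claim_equal_solution : Prop := ∀ (maps : List String), Dom_solution maps → Pre_solution maps → Spec_solution maps (solution maps)

-- ===== LEMMAS AND PROOFS =====

-- the land predicate: in bounds and not water
def pvLand (maps : List String) (n m : Int) (q : Int × Int) : Prop :=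
  0 ≤ q.1 ∧ q.1 < n ∧ 0 ≤ q.2 ∧ q.2 < m ∧ pvCharAt maps q.1 q.2 ≠ 'X'

def pvAdj (p q : Int × Int) : Prop :=
  ∃ d ∈ pvDirs, q = (p.1 + d.1, p.2 + d.2)

def pvStepIn (D V : Finset (Int × Int)) (p q : Int × Int) : Prop :=
  pvAdj p q ∧ q ∈ D ∧ q ∉ V

-- the characterisation both traversals satisfy: D is the connected component of s
-- relative to the already-visited set V (s itself already ∈ V)
def pvProps (maps : List String) (n m : Int) (D V : Finset (Int × Int))
    (s : Int × Int) : Prop :=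
  s ∈ D ∧ (∀ q ∈ D, q ∉ V ∨ q = s) ∧ (∀ q ∈ D, pvLand maps n m q) ∧
  (∀ q ∈ D, Relation.ReflTransGen (pvStepIn D V) s q) ∧
  (∀ q ∈ D, ∀ r, pvAdj q r → pvLand maps n m r → r ∈ V ∨ r ∈ D)

def pvGrid (n m : Int) : Finset (Int × Int) :=
  ((List.range n.toNat).flatMap (fun (i : Nat) =>
    (List.range m.toNat).map (fun (j : Nat) => ((i : Int), (j : Int))))).toFinset

def pvCnt (n m : Int) (V : Finset (Int × Int)) : Nat :=
  ((pvGrid n m).filter (· ∉ V)).card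

theorem mem_pvGrid (n m : Int) (q : Int × Int) :
    q ∈ pvGrid n m ↔ 0 ≤ q.1 ∧ q.1 < n ∧ 0 ≤ q.2 ∧ q.2 < m := by
  obtain ⟨a, b⟩ := q
  rw [pvGrid, List.mem_toFinset]
  constructor
  · intro h
    obtain ⟨i, hi, hq⟩ := List.mem_flatMap.mp h
    obtain ⟨j, hj, hqe⟩ := List.mem_map.mp hq
    rw [List.mem_range] at hi hj
    rw [Prod.mk.injEq] at hqe
    obtain ⟨e1, e2⟩ := hqe
    refine ⟨by omega, by omega, by omega, by omega⟩
  · rintro ⟨h1, h2, h3, h4⟩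
    refine List.mem_flatMap.mpr ⟨a.toNat, List.mem_range.mpr (by omega),
      List.mem_map.mpr ⟨b.toNat, List.mem_range.mpr (by omega), ?_⟩⟩
    rw [Prod.mk.injEq]
    exact ⟨by omega, by omega⟩

theorem pvLand_mem_grid (maps : List String) (n m : Int) (q : Int × Int)
    (h : pvLand maps n m q) : q ∈ pvGrid n m := by
  rw [mem_pvGrid]
  exact ⟨h.1, h.2.1, h.2.2.1, h.2.2.2.1⟩

theorem pvCnt_mono (n m : Int) (V V' : Finset (Int × Int)) (h : V ⊆ V') :
    pvCnt n m V' ≤ pvCnt n m V := by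
  apply Finset.card_le_card
  intro q hq
  simp only [Finset.mem_filter] at *
  exact ⟨hq.1, fun hv => hq.2 (h hv)⟩

theorem pvCnt_insert_lt (n m : Int) (V : Finset (Int × Int)) (q : Int × Int)
    (hg : q ∈ pvGrid n m) (hv : q ∉ V) :
    pvCnt n m (insert q V) < pvCnt n m V := by
  apply Finset.card_lt_card
  constructor
  · intro p hp
    simp only [Finset.mem_filter, Finset.mem_insert] at *
    exact ⟨hp.1, fun h => hp.2 (Or.inr h)⟩
  · intro hsub
    have h2 := hsub (Finset.mem_filter.mpr ⟨hg, hv⟩)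
    rw [Finset.mem_filter] at h2
    exact h2.2 (Finset.mem_insert_self q V)

theorem pvCnt_le (n m : Int) (V : Finset (Int × Int)) :
    pvCnt n m V ≤ n.toNat * m.toNat := by
  calc pvCnt n m V ≤ (pvGrid n m).card := Finset.card_filter_le _ _
    _ ≤ ((List.range n.toNat).flatMap (fun (i : Nat) =>
        (List.range m.toNat).map (fun (j : Nat) => ((i : Int), (j : Int))))).length :=
      List.toFinset_card_le _
    _ = n.toNat * m.toNat := by
      simp [List.length_flatMap, List.map_const']

theorem pvStepIn_mono (D D' V V' : Finset (Int × Int)) (hD : D ⊆ D') (hV : V' ⊆ V)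
    (p q : Int × Int) (h : pvStepIn D V p q) : pvStepIn D' V' p q :=
  ⟨h.1, hD h.2.1, fun hq => h.2.2 (hV hq)⟩

theorem pvProps_subset (maps : List String) (n m : Int) (D₁ D₂ V : Finset (Int × Int))
    (s : Int × Int) (h₁ : pvProps maps n m D₁ V s) (h₂ : pvProps maps n m D₂ V s) :
    D₁ ⊆ D₂ := by
  obtain ⟨hs₁, _, hland₁, hconn₁, _⟩ := h₁
  obtain ⟨hs₂, _, _, _, hclosed₂⟩ := h₂
  intro q hq
  have hpath := hconn₁ q hq
  clear hq
  induction hpath with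
  | refl => exact hs₂
  | tail hab hbc ih =>
    rename_i b c
    obtain ⟨hadj, hcD₁, hcV⟩ := hbc
    rcases hclosed₂ b ih c hadj (hland₁ c hcD₁) with h | h
    · exact absurd h hcV
    · exact h

theorem pvProps_unique (maps : List String) (n m : Int) (D₁ D₂ V : Finset (Int × Int))
    (s : Int × Int) (h₁ : pvProps maps n m D₁ V s) (h₂ : pvProps maps n m D₂ V s) :
    D₁ = D₂ :=
  le_antisymm (pvProps_subset maps n m D₁ D₂ V s h₁ h₂)
    (pvProps_subset maps n m D₂ D₁ V s h₂ h₁)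

-- the loop body of A's neighbour scan, named so the fold lemma can speak about it
def pvBodyA (maps : List String) (n m : Int) (f : Nat) (x y : Int)
    (st : Int × Finset (Int × Int)) (d : Int × Int) : Int × Finset (Int × Int) :=
  let nx := x + d.1
  let ny := y + d.2
  if nx < 0 ∨ ny < 0 ∨ n ≤ nx ∨ m ≤ ny then st
  else if (nx, ny) ∉ st.2 ∧ pvCharAt maps nx ny ≠ 'X' then
    let r := pvDfsA maps n m f nx ny (insert (nx, ny) st.2)
    (st.1 + r.1, r.2)
  else st

theorem pvDfsA_succ (maps : List String) (n m : Int) (f : Nat) (x y : Int)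
    (vis : Finset (Int × Int)) :
    pvDfsA maps n m (f + 1) x y vis =
      pvDirs.foldl (pvBodyA maps n m f x y) (pvValAt maps x y, vis) := by
  rw [pvDfsA]
  rfl

-- the invariant of A's neighbour scan: D is the set collected so far, ds the
-- directions still to process
def pvInvA (maps : List String) (n m : Int) (V : Finset (Int × Int)) (s : Int × Int)
    (ds : List (Int × Int)) (t : Int) (vis D : Finset (Int × Int)) : Prop :=
  vis = V ∪ D ∧ t = ∑ q ∈ D, pvValAt maps q.1 q.2 ∧ s ∈ D ∧
  (∀ q ∈ D, q ∉ V ∨ q = s) ∧ (∀ q ∈ D, pvLand maps n m q) ∧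
  (∀ q ∈ D, Relation.ReflTransGen (pvStepIn D V) s q) ∧
  (∀ q ∈ D, ∀ r, pvAdj q r → pvLand maps n m r →
    r ∈ V ∨ r ∈ D ∨ (q = s ∧ ∃ d ∈ ds, r = (s.1 + d.1, s.2 + d.2)))

theorem pvFoldA (maps : List String) (n m : Int) (f : Nat)
    (IH : ∀ (V : Finset (Int × Int)) (s : Int × Int), s ∈ V →
      pvLand maps n m s → pvCnt n m V + 1 ≤ f →
      ∃ D, pvDfsA maps n m f s.1 s.2 V = (∑ q ∈ D, pvValAt maps q.1 q.2, V ∪ D) ∧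
        pvProps maps n m D V s)
    (V : Finset (Int × Int)) (s : Int × Int) (hf : pvCnt n m V ≤ f) :
    ∀ (ds : List (Int × Int)), (∀ d ∈ ds, d ∈ pvDirs) →
      ∀ (t : Int) (vis D : Finset (Int × Int)), pvInvA maps n m V s ds t vis D →
      ∃ D', ds.foldl (pvBodyA maps n m f s.1 s.2) (t, vis) =
          (∑ q ∈ D', pvValAt maps q.1 q.2, V ∪ D') ∧ pvProps maps n m D' V s := by
  intro ds
  induction ds with
  | nil =>
    intro _ t vis D hInv
    obtain ⟨hvis, ht, hsD, hV, hland, hconn, hclosed⟩ := hInv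
    refine ⟨D, by rw [List.foldl_nil, ht, hvis], hsD, hV, hland, hconn, ?_⟩
    intro q hq r hadj hlr
    rcases hclosed q hq r hadj hlr with h | h | ⟨_, d, hd, _⟩
    · exact Or.inl h
    · exact Or.inr h
    · exact absurd hd (List.not_mem_nil)
  | cons d ds ih =>
    intro hds t vis D hInv
    obtain ⟨hvis, ht, hsD, hV, hland, hconn, hclosed⟩ := hInv
    rw [List.foldl_cons]
    have hDsub : D ⊆ vis := by rw [hvis]; exact Finset.subset_union_right
    have hVsub : V ⊆ vis := by rw [hvis]; exact Finset.subset_union_left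
    by_cases hout : s.1 + d.1 < 0 ∨ s.2 + d.2 < 0 ∨ n ≤ s.1 + d.1 ∨ m ≤ s.2 + d.2
    · have hb : pvBodyA maps n m f s.1 s.2 (t, vis) d = (t, vis) := by
        unfold pvBodyA; rw [if_pos hout]
      rw [hb]
      refine ih (fun d' hd' => hds d' (List.mem_cons_of_mem d hd')) t vis D
        ⟨hvis, ht, hsD, hV, hland, hconn, ?_⟩
      intro q hq r hadj hlr
      rcases hclosed q hq r hadj hlr with h | h | ⟨hqs, d', hd', hr⟩
      · exact Or.inl h
      · exact Or.inr (Or.inl h)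
      · rcases List.mem_cons.mp hd' with rfl | hd'
        · exfalso
          obtain ⟨hl1, hl2, hl3, hl4, _⟩ := hlr
          rw [hr] at hl1 hl2 hl3 hl4
          simp only at hl1 hl2 hl3 hl4
          omega
        · exact Or.inr (Or.inr ⟨hqs, d', hd', hr⟩)
    · by_cases htest : (s.1 + d.1, s.2 + d.2) ∉ vis ∧
        pvCharAt maps (s.1 + d.1) (s.2 + d.2) ≠ 'X'
      · -- recursive exploration of the neighbour nb
        set nb : Int × Int := (s.1 + d.1, s.2 + d.2) with hnb
        have hb : pvBodyA maps n m f s.1 s.2 (t, vis) d =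
            (t + (pvDfsA maps n m f nb.1 nb.2 (insert nb vis)).1,
             (pvDfsA maps n m f nb.1 nb.2 (insert nb vis)).2) := by
          unfold pvBodyA; rw [if_neg hout, if_pos htest]
        have hlnb : pvLand maps n m nb := by
          refine ⟨?_, ?_, ?_, ?_, htest.2⟩ <;> · simp only [hnb]; omega
        have hnbvis : nb ∉ vis := htest.1
        have hcnt : pvCnt n m (insert nb vis) + 1 ≤ f := by
          have h1 := pvCnt_insert_lt n m vis nb (pvLand_mem_grid maps n m nb hlnb) hnbvis
          have h2 := pvCnt_mono n m V vis hVsub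
          omega
        obtain ⟨Di, heq, hsDi, hVi, hlandi, hconni, hclosedi⟩ :=
          IH (insert nb vis) nb (Finset.mem_insert_self nb vis) hlnb hcnt
        rw [hb, heq]
        have hnbD : nb ∉ D := fun h => hnbvis (hDsub h)
        have hdisj : Disjoint D Di := by
          rw [Finset.disjoint_left]
          intro q hqD hqDi
          rcases hVi q hqDi with h | rfl
          · exact h (Finset.mem_insert_of_mem (hDsub hqD))
          · exact hnbD hqD
        have hvis' : insert nb vis ∪ Di = V ∪ (D ∪ Di) := by
          rw [Finset.insert_union,
            Finset.insert_eq_self.mpr (Finset.mem_union_right vis hsDi), hvis,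
            Finset.union_assoc]
        refine ih (fun d' hd' => hds d' (List.mem_cons_of_mem d hd'))
          (t + ∑ q ∈ Di, pvValAt maps q.1 q.2) (insert nb vis ∪ Di) (D ∪ Di)
          ⟨hvis', by rw [ht, Finset.sum_union hdisj], Finset.mem_union_left Di hsD,
           ?_, ?_, ?_, ?_⟩
        · intro q hq
          rcases Finset.mem_union.mp hq with h | h
          · exact hV q h
          · refine Or.inl fun hqV => ?_
            rcases hVi q h with h2 | rfl
            · exact h2 (Finset.mem_insert_of_mem (hVsub hqV))
            · exact hnbvis (hVsub hqV)
        · intro q hq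
          rcases Finset.mem_union.mp hq with h | h
          · exact hland q h
          · exact hlandi q h
        · intro q hq
          rcases Finset.mem_union.mp hq with h | h
          · exact (hconn q h).mono fun a b hab =>
              pvStepIn_mono D (D ∪ Di) V V Finset.subset_union_left
                (le_refl V) a b hab
          · have hstep : pvStepIn (D ∪ Di) V s nb :=
              ⟨⟨d, hds d List.mem_cons_self, hnb⟩, Finset.mem_union_right D hsDi,
               fun h => hnbvis (hVsub h)⟩
            have hpath := (hconni q h).mono fun a b hab =>
              pvStepIn_mono Di (D ∪ Di) (insert nb vis) V Finset.subset_union_right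
                (fun _ hx => Finset.mem_insert_of_mem (hVsub hx)) a b hab
            exact (Relation.ReflTransGen.single hstep).trans hpath
        · intro q hq r hadj hlr
          rcases Finset.mem_union.mp hq with h | h
          · rcases hclosed q h r hadj hlr with h2 | h2 | ⟨hqs, d', hd', hr⟩
            · exact Or.inl h2
            · exact Or.inr (Or.inl (Finset.mem_union_left Di h2))
            · rcases List.mem_cons.mp hd' with rfl | hd'
              · rw [← hnb] at hr
                exact Or.inr (Or.inl (Finset.mem_union_right D (hr ▸ hsDi)))
              · exact Or.inr (Or.inr ⟨hqs, d', hd', hr⟩)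
          · rcases hclosedi q h r hadj hlr with h2 | h2
            · rcases Finset.mem_insert.mp h2 with rfl | h2
              · exact Or.inr (Or.inl (Finset.mem_union_right D hsDi))
              · rw [hvis] at h2
                rcases Finset.mem_union.mp h2 with h3 | h3
                · exact Or.inl h3
                · exact Or.inr (Or.inl (Finset.mem_union_left Di h3))
            · exact Or.inr (Or.inl (Finset.mem_union_right D h2))
      · -- neighbour already visited or water: state unchanged
        have hb : pvBodyA maps n m f s.1 s.2 (t, vis) d = (t, vis) := by
          unfold pvBodyA; rw [if_neg hout, if_neg htest]
        rw [hb]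
        refine ih (fun d' hd' => hds d' (List.mem_cons_of_mem d hd')) t vis D
          ⟨hvis, ht, hsD, hV, hland, hconn, ?_⟩
        intro q hq r hadj hlr
        rcases hclosed q hq r hadj hlr with h | h | ⟨hqs, d', hd', hr⟩
        · exact Or.inl h
        · exact Or.inr (Or.inl h)
        · rcases List.mem_cons.mp hd' with rfl | hd'
          · rw [Classical.not_and_iff_not_or_not, not_not] at htest
            rcases htest with h2 | h2
            · rw [hvis] at h2
              rw [hr]
              rcases Finset.mem_union.mp h2 with h3 | h3
              · exact Or.inl h3
              · exact Or.inr (Or.inl h3)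
            · exfalso
              obtain ⟨_, _, _, _, hx⟩ := hlr
              rw [hr] at hx
              exact hx (not_not.mp h2)
          · exact Or.inr (Or.inr ⟨hqs, d', hd', hr⟩)

theorem pvDfsA_spec (maps : List String) (n m : Int) :
    ∀ (f : Nat) (V : Finset (Int × Int)) (s : Int × Int), s ∈ V →
      pvLand maps n m s → pvCnt n m V + 1 ≤ f →
      ∃ D, pvDfsA maps n m f s.1 s.2 V = (∑ q ∈ D, pvValAt maps q.1 q.2, V ∪ D) ∧
        pvProps maps n m D V s := by
  intro f
  induction f with
  | zero => intro V s _ _ hf; omega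
  | succ f IHf =>
    intro V s hsV hland hf
    rw [pvDfsA_succ]
    refine pvFoldA maps n m f IHf V s (by omega) pvDirs (fun d hd => hd)
      (pvValAt maps s.1 s.2) V {s} ⟨?_, ?_, Finset.mem_singleton_self s, ?_, ?_, ?_, ?_⟩
    · rw [Finset.union_eq_left.mpr (Finset.singleton_subset_iff.mpr hsV)]
    · rw [Finset.sum_singleton]
    · intro q hq
      exact Or.inr (Finset.mem_singleton.mp hq)
    · intro q hq
      rw [Finset.mem_singleton.mp hq]
      exact hland
    · intro q hq
      rw [Finset.mem_singleton.mp hq]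
    · intro q hq r hadj _
      obtain ⟨d, hd, hr⟩ := hadj
      rw [Finset.mem_singleton.mp hq] at hr ⊢
      exact Or.inr (Or.inr ⟨rfl, d, hd, hr⟩)

-- ===== B-side lemmas: the frontier BFS computes the same component =====

theorem mem_pvNxt (maps : List String) (n m : Int)
    (seen comp frontier : Finset (Int × Int)) (q : Int × Int) :
    q ∈ pvNxt maps n m seen comp frontier ↔
      (∃ p ∈ frontier, pvAdj p q) ∧ pvLand maps n m q ∧ q ∉ comp ∧ q ∉ seen := by
  simp only [pvNxt, Finset.mem_filter, Finset.mem_biUnion, List.mem_toFinset,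
    List.mem_map, pvLand, pvAdj]
  constructor
  · rintro ⟨⟨p, hp, d, hd, hq⟩, h1, h2, h3, h4, h5, h6, h7⟩
    exact ⟨⟨p, hp, d, hd, hq.symm⟩, ⟨h1, h2, h3, h4, h5⟩, h6, h7⟩
  · rintro ⟨⟨p, hp, d, hd, hq⟩, ⟨h1, h2, h3, h4, h5⟩, h6, h7⟩
    exact ⟨⟨p, hp, d, hd, hq.symm⟩, h1, h2, h3, h4, h5, h6, h7⟩

-- the invariant carried through B's while-loop
def pvInvC (maps : List String) (n m : Int) (seen : Finset (Int × Int)) (s : Int × Int)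
    (comp frontier : Finset (Int × Int)) : Prop :=
  s ∈ comp ∧ frontier ⊆ comp ∧
  (∀ q ∈ comp, q ∉ insert s seen ∨ q = s) ∧
  (∀ q ∈ comp, pvLand maps n m q) ∧
  (∀ q ∈ comp, Relation.ReflTransGen (pvStepIn comp (insert s seen)) s q) ∧
  (∀ q ∈ comp, q ∉ frontier → ∀ r, pvAdj q r → pvLand maps n m r →
    r ∈ insert s seen ∨ r ∈ comp)

theorem pvInvC_props (maps : List String) (n m : Int) (seen : Finset (Int × Int))
    (s : Int × Int) (comp : Finset (Int × Int))
    (h : pvInvC maps n m seen s comp ∅) :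
    pvProps maps n m comp (insert s seen) s := by
  obtain ⟨hs, _, hV, hland, hreach, hclosed⟩ := h
  exact ⟨hs, hV, hland, hreach,
    fun q hq r hadj hlr => hclosed q hq (Finset.notMem_empty q) r hadj hlr⟩

theorem pvBfs_run (maps : List String) (n m : Int) (seen : Finset (Int × Int))
    (s : Int × Int) :
    ∀ (f : Nat) (comp frontier : Finset (Int × Int)),
      pvInvC maps n m seen s comp frontier →
      (frontier = ∅ ∨ pvCnt n m (seen ∪ comp) + 1 ≤ f) →
      pvProps maps n m (pvBfs maps n m seen f comp frontier) (insert s seen) s := by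
  intro f
  induction f with
  | zero =>
    intro comp frontier hInv hf
    have hfe : frontier = ∅ := by
      rcases hf with h | h
      · exact h
      · omega
    subst hfe
    exact pvInvC_props maps n m seen s comp hInv
  | succ f ih =>
    intro comp frontier hInv hf
    rw [pvBfs]
    by_cases hfe : frontier = ∅
    · rw [if_pos hfe]
      subst hfe
      exact pvInvC_props maps n m seen s comp hInv
    · rw [if_neg hfe]
      obtain ⟨hs, hFC, hnotV, hland, hreach, hclosed⟩ := hInv
      have hnxt : ∀ q ∈ pvNxt maps n m seen comp frontier,
          (∃ p ∈ frontier, pvAdj p q) ∧ pvLand maps n m q ∧ q ∉ comp ∧ q ∉ seen :=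
        fun q hq => (mem_pvNxt maps n m seen comp frontier q).mp hq
      have hnxtV : ∀ q ∈ pvNxt maps n m seen comp frontier, q ∉ insert s seen := by
        intro q hq
        obtain ⟨_, _, hqc, hqs⟩ := hnxt q hq
        rw [Finset.mem_insert]
        rintro (rfl | h)
        · exact hqc hs
        · exact hqs h
      have hInv' : pvInvC maps n m seen s
          (comp ∪ pvNxt maps n m seen comp frontier)
          (pvNxt maps n m seen comp frontier) := by
        refine ⟨Finset.mem_union_left _ hs, Finset.subset_union_right, ?_, ?_, ?_, ?_⟩
        · intro q hq
          rcases Finset.mem_union.mp hq with h | h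
          · exact hnotV q h
          · exact Or.inl (hnxtV q h)
        · intro q hq
          rcases Finset.mem_union.mp hq with h | h
          · exact hland q h
          · exact (hnxt q h).2.1
        · intro q hq
          rcases Finset.mem_union.mp hq with h | h
          · exact (hreach q h).mono fun a b hab =>
              pvStepIn_mono comp _ _ _ Finset.subset_union_left (Finset.Subset.refl _) a b hab
          · obtain ⟨⟨p, hp, hadj⟩, _, _, _⟩ := hnxt q h
            have hpath : Relation.ReflTransGen
                (pvStepIn (comp ∪ pvNxt maps n m seen comp frontier) (insert s seen)) s p :=
              (hreach p (hFC hp)).mono fun a b hab =>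
                pvStepIn_mono comp _ _ _ Finset.subset_union_left (Finset.Subset.refl _) a b hab
            exact hpath.tail ⟨hadj, Finset.mem_union_right _ h, hnxtV q h⟩
        · intro q hq hqn r hadj hlr
          have hqc : q ∈ comp := by
            rcases Finset.mem_union.mp hq with h | h
            · exact h
            · exact absurd h hqn
          by_cases hqf : q ∈ frontier
          · by_cases hrV : r ∈ insert s seen
            · exact Or.inl hrV
            · by_cases hrC : r ∈ comp
              · exact Or.inr (Finset.mem_union_left _ hrC)
              · refine Or.inr (Finset.mem_union_right _ ?_)
                rw [mem_pvNxt]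
                refine ⟨⟨q, hqf, hadj⟩, hlr, hrC, fun h => hrV ?_⟩
                exact Finset.mem_insert_of_mem h
          · rcases hclosed q hqc hqf r hadj hlr with h | h
            · exact Or.inl h
            · exact Or.inr (Finset.mem_union_left _ h)
      by_cases hne : pvNxt maps n m seen comp frontier = ∅
      · exact ih _ _ hInv' (Or.inl hne)
      · refine ih _ _ hInv' (Or.inr ?_)
        obtain ⟨q, hq⟩ := Finset.nonempty_iff_ne_empty.mpr hne
        obtain ⟨_, hql, hqc, hqs⟩ := hnxt q hq
        have h1 : pvCnt n m (seen ∪ (comp ∪ pvNxt maps n m seen comp frontier)) ≤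
            pvCnt n m (insert q (seen ∪ comp)) := by
          apply pvCnt_mono
          intro z hz
          rcases Finset.mem_insert.mp hz with rfl | hz
          · exact Finset.mem_union_right _ (Finset.mem_union_right _ hq)
          · rcases Finset.mem_union.mp hz with h | h
            · exact Finset.mem_union_left _ h
            · exact Finset.mem_union_right _ (Finset.mem_union_left _ h)
        have h2 : pvCnt n m (insert q (seen ∪ comp)) < pvCnt n m (seen ∪ comp) := by
          refine pvCnt_insert_lt n m _ q (pvLand_mem_grid maps n m q hql) ?_
          rw [Finset.mem_union]
          rintro (h | h)
          · exact hqs h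
          · exact hqc h
        rcases hf with h | h
        · exact absurd h hfe
        · omega

theorem pvBfs_spec (maps : List String) (n m : Int) (f : Nat)
    (seen : Finset (Int × Int)) (s : Int × Int)
    (hl : pvLand maps n m s) (hf : pvCnt n m (insert s seen) + 1 ≤ f) :
    pvProps maps n m (pvBfs maps n m seen f {s} {s}) (insert s seen) s := by
  refine pvBfs_run maps n m seen s f {s} {s}
    ⟨Finset.mem_singleton_self s, Finset.Subset.refl _,
     fun q hq => Or.inr (Finset.mem_singleton.mp hq),
     fun q hq => (Finset.mem_singleton.mp hq) ▸ hl,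
     fun q hq => (Finset.mem_singleton.mp hq) ▸ Relation.ReflTransGen.refl,
     fun q hq hqn => absurd (Finset.mem_singleton.mp hq ▸
       Finset.mem_singleton_self s) hqn⟩ (Or.inr ?_)
  have : seen ∪ {s} = insert s seen := by
    ext z
    simp
  rw [this]
  exact hf

-- ===== outer-loop correspondence =====

theorem pvFoldlCongr {α β : Type} (l : List β) (f g : α → β → α) (a : α)
    (h : ∀ x ∈ l, ∀ st, f st x = g st x) : l.foldl f a = l.foldl g a := by
  induction l generalizing a with
  | nil => rfl
  | cons x xs ih =>
    rw [List.foldl_cons, List.foldl_cons, h x List.mem_cons_self a]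
    exact ih _ fun x' hx' st => h x' (List.mem_cons_of_mem x hx') st

theorem pvFoldlFlatten {α β σ : Type} (l : List α) (g : α → List β) (h : σ → β → σ)
    (a : σ) : l.foldl (fun st x => (g x).foldl h st) a = (l.flatMap g).foldl h a := by
  induction l generalizing a with
  | nil => rfl
  | cons x xs ih =>
    rw [List.foldl_cons, List.flatMap_cons, List.foldl_append, ih]

theorem pvFoldlFilterSkip {β σ : Type} (p : β → Bool) (body : σ → β → σ)
    (l : List β) (h : ∀ x ∈ l, p x = false → ∀ st, body st x = st) (a : σ) :
    l.foldl body a = (l.filter p).foldl body a := by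
  induction l generalizing a with
  | nil => rfl
  | cons x xs ih =>
    cases hx : p x with
    | true =>
      rw [List.foldl_cons, List.filter_cons_of_pos hx, List.foldl_cons]
      exact ih (fun z hz => h z (List.mem_cons_of_mem x hz)) _
    | false =>
      rw [List.foldl_cons, List.filter_cons_of_neg (by simp [hx]),
        h x List.mem_cons_self hx a]
      exact ih (fun z hz => h z (List.mem_cons_of_mem x hz)) _

theorem pvFilterFlatMap {α β : Type} (l : List α) (g : α → List β) (p : β → Bool) :
    (l.flatMap g).filter p = l.flatMap (fun x => (g x).filter p) := by
  induction l with
  | nil => rfl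
  | cons x xs ih =>
    rw [List.flatMap_cons, List.flatMap_cons, List.filter_append, ih]

-- per-cell equality: A's dfs step and B's BFS step produce the same pair
theorem pvCellRun_eq (maps : List String) (n m : Int) (F : Nat)
    (hF : n.toNat * m.toNat + 1 ≤ F) (i j : Int) (vis : Finset (Int × Int))
    (hi0 : 0 ≤ i) (hin : i < n) (hj0 : 0 ≤ j) (hjm : j < m)
    (hX : pvCharAt maps i j ≠ 'X') :
    pvDfsA maps n m F i j (insert (i, j) vis) =
      (∑ q ∈ pvBfs maps n m vis F {(i, j)} {(i, j)}, pvValAt maps q.1 q.2,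
       vis ∪ pvBfs maps n m vis F {(i, j)} {(i, j)}) := by
  have hland : pvLand maps n m ((i, j) : Int × Int) := ⟨hi0, hin, hj0, hjm, hX⟩
  have hcnt : pvCnt n m (insert (i, j) vis) + 1 ≤ F := by
    have := pvCnt_le n m (insert (i, j) vis)
    omega
  obtain ⟨DA, hA, hpA⟩ := pvDfsA_spec maps n m F (insert (i, j) vis) (i, j)
    (Finset.mem_insert_self _ _) hland hcnt
  have hpB := pvBfs_spec maps n m F vis (i, j) hland hcnt
  have hDB : DA = pvBfs maps n m vis F {(i, j)} {(i, j)} :=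
    pvProps_unique maps n m DA _ _ _ hpA hpB
  dsimp only at hA
  rw [hA, hDB]
  have hmem : ((i, j) : Int × Int) ∈ pvBfs maps n m vis F {(i, j)} {(i, j)} := hpB.1
  rw [Finset.insert_union, Finset.insert_eq_self.mpr (Finset.mem_union_right vis hmem)]

theorem solution_eq (maps : List String) : solution maps = solution_alt maps := by
  unfold solution solution_alt
  dsimp only
  set n : Int := (maps.length : Int) with hn
  set m : Int := ((maps.headD "").toList.length : Int) with hm
  set F : Nat := maps.length * (maps.headD "").toList.length + 1 with hF
  have hFb : n.toNat * m.toNat + 1 ≤ F := by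
    simp [hn, hm, hF]
  -- A's nested scan as a single fold over all cells
  have step1 : ∀ (init : Finset (Int × Int) × List Int),
      (PySem.List.pyRange 0 n 1).foldl (fun st i =>
        (PySem.List.pyRange 0 m 1).foldl (fun (st : Finset (Int × Int) × List Int) j =>
          if (i, j) ∈ st.1 ∨ pvCharAt maps i j = 'X' then st
          else
            let r := pvDfsA maps n m F i j (insert (i, j) st.1)
            (r.2, st.2 ++ [r.1])) st) init =
      ((PySem.List.pyRange 0 n 1).flatMap (fun i =>
        (PySem.List.pyRange 0 m 1).map (fun j => ((i : Int), (j : Int))))).foldl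
        (fun (st : Finset (Int × Int) × List Int) c =>
          if c ∈ st.1 ∨ pvCharAt maps c.1 c.2 = 'X' then st
          else
            let r := pvDfsA maps n m F c.1 c.2 (insert c st.1)
            (r.2, st.2 ++ [r.1])) init := by
    intro init
    rw [← pvFoldlFlatten]
    refine pvFoldlCongr _ _ _ _ ?_
    intro i _ st
    rw [List.foldl_map]
  rw [step1]
  -- drop the water cells: they are no-ops of A's body
  rw [pvFoldlFilterSkip (fun c => decide (pvCharAt maps c.1 c.2 ≠ 'X'))]
  · rw [pvFilterFlatMap]
    have hcells : ((PySem.List.pyRange 0 n 1).flatMap (fun i =>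
        ((PySem.List.pyRange 0 m 1).map (fun j => ((i : Int), (j : Int)))).filter
          (fun c => decide (pvCharAt maps c.1 c.2 ≠ 'X')))) = pvLandCells maps n m := by
      unfold pvLandCells
      refine congrFun (congrArg List.flatMap (funext fun i => ?_)) _
      rw [List.filter_map]
      rfl
    rw [hcells]
    -- on land cells the two bodies agree
    have step2 : ∀ (init : Finset (Int × Int) × List Int),
        (pvLandCells maps n m).foldl
          (fun (st : Finset (Int × Int) × List Int) c =>
            if c ∈ st.1 ∨ pvCharAt maps c.1 c.2 = 'X' then st
            else
              let r := pvDfsA maps n m F c.1 c.2 (insert c st.1)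
              (r.2, st.2 ++ [r.1])) init =
        (pvLandCells maps n m).foldl
          (fun (st : Finset (Int × Int) × List Int) cell =>
            if cell ∈ st.1 then st
            else
              let comp := pvBfs maps n m st.1 F {cell} {cell}
              (st.1 ∪ comp, st.2 ++ [∑ q ∈ comp, pvValAt maps q.1 q.2])) init := by
      intro init
      refine pvFoldlCongr _ _ _ _ ?_
      intro c hc st
      obtain ⟨i, j⟩ := c
      have hc' : (0 ≤ i ∧ i < n) ∧ (0 ≤ j ∧ j < m) ∧ pvCharAt maps i j ≠ 'X' := by
        simp only [pvLandCells, List.mem_flatMap, List.mem_map, List.mem_filter,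
          PySem.List.mem_pyRange_one, Prod.mk.injEq] at hc
        obtain ⟨i', hi', j', ⟨hj', hd⟩, rfl, rfl⟩ := hc
        exact ⟨hi', hj', by simpa using hd⟩
      obtain ⟨⟨hi0, hin⟩, ⟨hj0, hjm⟩, hX⟩ := hc'
      by_cases hmem : ((i, j) : Int × Int) ∈ st.1
      · rw [if_pos (Or.inl hmem), if_pos hmem]
      · rw [if_neg (by rintro (h | h); exact hmem h; exact hX h), if_neg hmem]
        dsimp only
        rw [pvCellRun_eq maps n m F hFb i j st.1 hi0 hin hj0 hjm hX]
    rw [step2]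
    -- final branch: len == 0 vs truthiness
    cases h : ((pvLandCells maps n m).foldl
        (fun (st : Finset (Int × Int) × List Int) cell =>
          if cell ∈ st.1 then st
          else
            let comp := pvBfs maps n m st.1 F {cell} {cell}
            (st.1 ∪ comp, st.2 ++ [∑ q ∈ comp, pvValAt maps q.1 q.2]))
        (∅, ([] : List Int))).2 with
    | nil => simp
    | cons z zs => simp
  · -- water cells are no-ops of A's body
    intro c _ hXc st
    simp only [decide_eq_false_iff_not, not_not] at hXc
    rw [if_pos (Or.inr hXc)]

-- ===== VERDICT (by name: the statement is the Claim_ definition above) =====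
theorem solution_spec : Claim_equal_solution := by
  intro maps _ _
  unfold Spec_solution
  exact solution_eq maps
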